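-- pv_equiv track=rewrite | github.com/AccessRank42/BAtool | simpl.py | cond_2_check
-- ===== SOURCE A (Python) =====
-- def cond_2_check(SE_model_list, A, A_subsets, model):
--     Y = model[1]
--     if Y != model[0]:
--         return True
--     Xs = generate_sets(set(), Y)
--     for X in Xs:
--         Ms = generate_sets(X, Y)
--         M_failed = False
--         for M in Ms:
--             if (M, Y) in SE_model_list: # <M, Y> \notin SE(P) does not hold
--                 M_failed = True
--                 break
--         if M_failed:
--             continue # not a valid X
--
--         X_complement_A, Y_complement_A = project_to_complement(X, Y, A)
--
--         for X_prime in [X_complement_A | sub_A for sub_A in A_subsets]: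
--             valid_Y_prime_exists = False
--             for model_prime in SE_model_list:
--                 Y_prime = model_prime[1]
--
--                 X_prime_complement_A, Y_prime_complement_A = project_to_complement(
--                     X_prime, Y_prime, A)
--                 if (Y_prime != model_prime[0]
--                     or Y_complement_A != Y_prime_complement_A
--                     or not X_prime <= Y_prime):
--                     continue                                    # not a valid Y'
--
--
--                 M_primes = generate_sets(X_prime, Y_prime)
--                 M_prime_failed = False
--                 for M_prime in M_primes:
--                     if (M_prime, Y_prime) in SE_model_list: # <M', Y'> \notin SE(P) does not hold
--                         M_prime_failed = True
--                         break
--                 if not M_prime_failed: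
--                     valid_Y_prime_exists = True
--                     break
--
--             if not valid_Y_prime_exists:
--                 return False
--     return True
--
-- def project_to_complement(X, Y, A):
--     X_complement_A = X - A
--     Y_complement_A = Y - A
--     return (X_complement_A, Y_complement_A)
--
-- def generate_sets(subseteq, supset):
--     extra_elems = list(supset - subseteq)
--     sets = [subseteq]
--     sets.extend(gen_sets_rec(subseteq, extra_elems))
--     sets.remove(supset) # this should not be necessary, fix so it doesn't get added
--     return sets
--
-- def gen_sets_rec(start_set, elems):
--     result = []
--     for i in range(len(elems)):
--         new_set = start_set | {elems[i]}
--         result.append(new_set)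
--         result.extend(gen_sets_rec(new_set, elems[i+1:]))
--     return result
-- ===== SOURCE B (Python) =====
-- def cond_2_check(SE_model_list, A, A_subsets, model):
--     Y = model[1]
--     if Y != model[0]:
--         return True
--     Y_c = Y - A
--     # candidate Y-primes hoisted out of both loops: reflexive SE-models whose A-projection matches Y's
--     candidates = [mp[1] for mp in SE_model_list
--                   if mp[0] == mp[1] and mp[1] - A == Y_c]
--
--     def blocked(X_, Y_):
--         # exists <M, Y_> in SE(P) with X_ <= M and M a PROPER subset of Y_
--         return any(Yp == Y_ and X_ <= M and (M <= Y_ and not M == Y_)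
--                    for M, Yp in SE_model_list)
--
--     # all subsets of Y by iterative doubling (Y itself is skipped in the loop)
--     subsets = [frozenset()]
--     for e in Y:
--         subsets = subsets + [s | {e} for s in subsets]
--
--     for X in subsets:
--         if X == Y or blocked(X, Y):
--             continue
--         X_c = X - A
--         for sub_A in A_subsets:
--             X_prime = X_c | sub_A
--             if not any(X_prime <= Yp and not blocked(X_prime, Yp) for Yp in candidates):
--                 return False
--     return True
-- ===== Notes on version B (the rewrite author's own statement) =====
-- stated objective: alternative
-- what changed: B replaces A's generate_sets subset enumerations in the M/M'-failure checks by a single linear scan of SE_model_list testing X <= M < Y directly, hoists the Y-A projection filter out of all loops into one precomputed candidate list (only reflexive models with a matching projection can pass A's inner filter), and builds the outer subset family by iterative doubling instead of recursive generation with a remove pass; it trades subset enumeration for SE-list scans, which helps only when Y is large relative to SE_model_list.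
import Mathlib
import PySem

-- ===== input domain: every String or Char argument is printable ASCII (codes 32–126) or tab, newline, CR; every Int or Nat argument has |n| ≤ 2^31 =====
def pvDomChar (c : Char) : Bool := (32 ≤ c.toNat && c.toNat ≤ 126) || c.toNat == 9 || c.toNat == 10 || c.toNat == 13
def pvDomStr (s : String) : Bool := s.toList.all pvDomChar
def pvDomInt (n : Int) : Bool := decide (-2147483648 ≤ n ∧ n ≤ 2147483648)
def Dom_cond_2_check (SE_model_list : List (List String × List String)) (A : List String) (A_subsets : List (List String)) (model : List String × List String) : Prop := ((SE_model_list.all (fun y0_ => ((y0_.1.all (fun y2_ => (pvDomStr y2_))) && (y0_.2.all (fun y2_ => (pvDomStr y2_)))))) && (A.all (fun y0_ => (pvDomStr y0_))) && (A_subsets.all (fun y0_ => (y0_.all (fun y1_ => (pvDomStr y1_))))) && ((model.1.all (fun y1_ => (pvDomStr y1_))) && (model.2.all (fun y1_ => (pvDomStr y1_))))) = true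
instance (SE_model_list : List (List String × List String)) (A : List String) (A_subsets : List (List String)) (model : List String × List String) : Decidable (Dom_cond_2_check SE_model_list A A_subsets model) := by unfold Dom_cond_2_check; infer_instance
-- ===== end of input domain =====

-- B replaces A's generate_sets subset enumerations in the M/M' checks by a single scan of
-- SE_model_list (testing X ⊆ M ⊊ Y directly), hoists the Y-A projection filter into one precomputed
-- candidate list, and builds the X subsets by iterative doubling (objective: alternative algorithm).
-- Python sets are modelled as duplicate-free lists (PySem.Set); set equality/subset are order-insensitive.

-- ===== PORT A =====
-- (M, Y) in SE_model_list : tuple '==' compares both components as sets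
def pvInSE (SE : List (List String × List String)) (M Yv : List String) : Bool :=
  SE.any (fun p => PySem.Set.equal p.1 M && PySem.Set.equal p.2 Yv)

-- gen_sets_rec(start_set, elems)
def genSetsRec (start : List String) : List String → List (List String)
  | [] => []
  | e :: rest =>
    let ns := PySem.Set.add start e
    ns :: (genSetsRec ns rest ++ genSetsRec start rest)

-- sets.remove(supset): drop the FIRST element set-equal to the target
-- (Python raises ValueError when no element matches; unreachable from cond_2_check, where
--  generate_sets is only called with subseteq ⊆ supset, so the full set is always present)
def removeFirstEq (target : List String) : List (List String) → List (List String)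
  | [] => []
  | s :: rest => if PySem.Set.equal s target then rest else s :: removeFirstEq target rest

-- generate_sets(subseteq, supset)
def generateSets (subseteq supset : List String) : List (List String) :=
  let extra := PySem.Set.diff supset subseteq
  removeFirstEq supset (subseteq :: genSetsRec subseteq extra)

-- the M-loop with its break: M_failed
def pvMFailed (SE : List (List String × List String)) (X Y : List String) : Bool :=
  (generateSets X Y).any (fun M => pvInSE SE M Y)

-- the model_prime-loop with its break: valid_Y_prime_exists
def pvValidYprime (SE : List (List String × List String)) (A : List String)
    (Yc Xp : List String) : Bool :=
  SE.any (fun mp =>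
    let Yp := mp.2
    let proj := (PySem.Set.diff Xp A, PySem.Set.diff Yp A)  -- project_to_complement(X', Y', A)
    if !(PySem.Set.equal Yp mp.1) || !(PySem.Set.equal Yc proj.2)
        || !(PySem.Set.issubset Xp Yp) then
      false  -- continue: not a valid Y'
    else
      !(pvMFailed SE Xp Yp))

-- the outer X-loop (continue / return False / fall through to True)
def pvLoopX (SE : List (List String × List String)) (A : List String)
    (Asubs : List (List String)) (Y : List String) : List (List String) → Bool
  | [] => true
  | X :: rest =>
    if pvMFailed SE X Y then pvLoopX SE A Asubs Y rest  -- continue: not a valid X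
    else
      let Xc := PySem.Set.diff X A
      let Yc := PySem.Set.diff Y A
      if (Asubs.map (fun sub => PySem.Set.union Xc sub)).all
          (fun Xp => pvValidYprime SE A Yc Xp) then
        pvLoopX SE A Asubs Y rest
      else false  -- return False

def cond_2_check (SE_model_list : List (List String × List String)) (A : List String) (A_subsets : List (List String)) (model : List String × List String) : Bool :=
  let Y := model.2
  if !(PySem.Set.equal Y model.1) then true
  else pvLoopX SE_model_list A A_subsets Y (generateSets PySem.Set.empty Y)

-- ===== PORT B =====
-- blocked(X_, Y_): one scan of SE_model_list instead of enumerating subsets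
def pvBlocked (SE : List (List String × List String)) (Xs Ys : List String) : Bool :=
  SE.any (fun p => PySem.Set.equal p.2 Ys && PySem.Set.issubset Xs p.1 &&
    (PySem.Set.issubset p.1 Ys && !(PySem.Set.equal p.1 Ys)))

-- subsets of Y by iterative doubling
def pvPow (Y : List String) : List (List String) :=
  Y.foldl (fun acc e => acc ++ acc.map (fun s => PySem.Set.add s e)) [PySem.Set.empty]

def cond_2_check_alt (SE_model_list : List (List String × List String)) (A : List String) (A_subsets : List (List String)) (model : List String × List String) : Bool :=
  let Y := model.2
  if !(PySem.Set.equal Y model.1) then true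
  else
    let Yc := PySem.Set.diff Y A
    let candidates :=
      (SE_model_list.filter (fun mp =>
        PySem.Set.equal mp.1 mp.2 && PySem.Set.equal (PySem.Set.diff mp.2 A) Yc)).map (·.2)
    (pvPow Y).all (fun X =>
      PySem.Set.equal X Y || pvBlocked SE_model_list X Y ||
      (let Xc := PySem.Set.diff X A
       A_subsets.all (fun sub =>
         let Xp := PySem.Set.union Xc sub
         candidates.any (fun Yp =>
           PySem.Set.issubset Xp Yp && !(pvBlocked SE_model_list Xp Yp)))))

-- ===== PRECONDITION & SPEC =====
-- Pre_ is the set-representation invariant of the type convention: every list standing for a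
-- Python set is duplicate-free (a Python set cannot contain duplicates, so no Python input is excluded).
def Pre_cond_2_check (SE_model_list : List (List String × List String)) (A : List String) (A_subsets : List (List String)) (model : List String × List String) : Prop :=
  (∀ p ∈ SE_model_list, p.1.Nodup ∧ p.2.Nodup) ∧ A.Nodup ∧
  (∀ s ∈ A_subsets, s.Nodup) ∧ model.1.Nodup ∧ model.2.Nodup
instance (SE_model_list : List (List String × List String)) (A : List String) (A_subsets : List (List String)) (model : List String × List String) : Decidable (Pre_cond_2_check SE_model_list A A_subsets model) := by unfold Pre_cond_2_check; infer_instance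

def pvWitness_cond_2_check : (List (List String × List String)) × List String × List (List String) × (List String × List String) :=
  ([(["a"], ["a", "b"])], ["b"], [["b"]], (["a", "b"], ["a", "b"]))

def Spec_cond_2_check (SE_model_list : List (List String × List String)) (A : List String) (A_subsets : List (List String)) (model : List String × List String) (out : Bool) : Prop := out = cond_2_check_alt SE_model_list A A_subsets model
instance (SE_model_list : List (List String × List String)) (A : List String) (A_subsets : List (List String)) (model : List String × List String) (out : Bool) : Decidable (Spec_cond_2_check SE_model_list A A_subsets model out) := by unfold Spec_cond_2_check; infer_instance

-- ===== CLAIM (what is proved, stated in full; the proofs are below) =====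
def Claim_equal_cond_2_check : Prop := ∀ (SE_model_list : List (List String × List String)) (A : List String) (A_subsets : List (List String)) (model : List String × List String), Dom_cond_2_check SE_model_list A A_subsets model → Pre_cond_2_check SE_model_list A A_subsets model → Spec_cond_2_check SE_model_list A A_subsets model (cond_2_check SE_model_list A A_subsets model)

-- ===== LEMMAS AND PROOFS =====

-- gen_sets_rec enumerates start ++ u for the nonempty sublists u of elems
theorem genSetsRec_mem (extra : List String) (start L : List String)
    (hnd : extra.Nodup) (hdisj : ∀ a ∈ extra, a ∉ start) :
    L ∈ genSetsRec start extra ↔ ∃ u, u.Sublist extra ∧ u ≠ [] ∧ L = start ++ u := by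
  induction extra generalizing start L with
  | nil => simp [genSetsRec]
  | cons e rest ih =>
    have hcons := List.nodup_cons.mp hnd
    have hadd : PySem.Set.add start e = start ++ [e] :=
      PySem.Set.add_of_not_mem (hdisj e (by simp))
    have hd1 : ∀ a ∈ rest, a ∉ start ++ [e] := by
      intro a ha
      simp only [List.mem_append, List.mem_singleton]
      rintro (h | rfl)
      · exact hdisj a (by simp [ha]) h
      · exact hcons.1 ha
    have hd2 : ∀ a ∈ rest, a ∉ start := fun a ha => hdisj a (by simp [ha])
    simp only [genSetsRec, hadd, List.mem_cons, List.mem_append]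
    constructor
    · rintro (rfl | h | h)
      · exact ⟨[e], by simp, by simp, rfl⟩
      · obtain ⟨u, hu, hne, rfl⟩ := (ih _ _ hcons.2 hd1).mp h
        exact ⟨e :: u, hu.cons₂ e, by simp, by simp⟩
      · obtain ⟨u, hu, hne, rfl⟩ := (ih _ _ hcons.2 hd2).mp h
        exact ⟨u, hu.trans (List.sublist_cons_self e rest), hne, rfl⟩
    · rintro ⟨u, hu, hne, rfl⟩
      rcases List.sublist_cons_iff.mp hu with h | ⟨r, rfl, hr⟩
      · exact Or.inr (Or.inr ((ih _ _ hcons.2 hd2).mpr ⟨u, h, hne, rfl⟩))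
      · rcases eq_or_ne r [] with rfl | hrne
        · exact Or.inl rfl
        · exact Or.inr (Or.inl ((ih _ _ hcons.2 hd1).mpr ⟨r, hr, hrne, by simp⟩))

-- the full list start ++ extra occurs exactly once in gen_sets_rec
theorem genSetsRec_count (extra : List String) (start : List String)
    (hnd : extra.Nodup) (hdisj : ∀ a ∈ extra, a ∉ start) (hne : extra ≠ []) :
    (genSetsRec start extra).count (start ++ extra) = 1 := by
  induction extra generalizing start with
  | nil => exact absurd rfl hne
  | cons e rest ih =>
    have hcons := List.nodup_cons.mp hnd
    have hadd : PySem.Set.add start e = start ++ [e] :=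
      PySem.Set.add_of_not_mem (hdisj e (by simp))
    have hd1 : ∀ a ∈ rest, a ∉ start ++ [e] := by
      intro a ha
      simp only [List.mem_append, List.mem_singleton]
      rintro (h | rfl)
      · exact hdisj a (by simp [ha]) h
      · exact hcons.1 ha
    have hd2 : ∀ a ∈ rest, a ∉ start := fun a ha => hdisj a (by simp [ha])
    rcases eq_or_ne rest [] with rfl | hrest
    · simp [genSetsRec, hadd]
    · have hF : start ++ e :: rest = (start ++ [e]) ++ rest := by simp
      have hne1 : (start ++ [e]) ≠ (start ++ e :: rest) := by
        intro h
        have hl := congrArg List.length h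
        simp at hl
        first
        | exact hrest hl.symm
        | exact hrest hl
      have h2 : (genSetsRec (start ++ [e]) rest).count (start ++ e :: rest) = 1 := by
        rw [hF]; exact ih _ hcons.2 hd1 hrest
      have h3 : (genSetsRec start rest).count (start ++ e :: rest) = 0 := by
        rw [List.count_eq_zero]
        intro hmem
        obtain ⟨u, hu, -, heq⟩ := (genSetsRec_mem rest start _ hcons.2 hd2).mp hmem
        have hlen := congrArg List.length heq
        have := hu.length_le
        simp at hlen
        omega
      show List.count _ (PySem.Set.add start e :: (genSetsRec (PySem.Set.add start e) rest ++ genSetsRec start rest)) = 1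
      rw [hadd, List.count_cons, List.count_append, h2, h3]
      simp [hne1]

-- a sublist of a Nodup list containing all its elements is the whole list
theorem sublist_eq_of_superset {u e : List String} (h : u.Sublist e) (hn : e.Nodup)
    (hs : ∀ x ∈ e, x ∈ u) : u = e := by
  have hp : u.Perm e := by
    rw [List.perm_ext_iff_of_nodup (h.nodup hn) hn]
    exact fun a => ⟨fun ha => h.mem ha, hs a⟩
  exact h.eq_of_length hp.length_eq

-- list.remove under "all matches are the literal F, which occurs once"
theorem removeFirstEq_mem (target F : List String) (l : List (List String))
    (hkey : ∀ L ∈ l, (PySem.Set.equal L target = true ↔ L = F))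
    (hc : l.count F = 1) (X : List String) :
    X ∈ removeFirstEq target l ↔ X ∈ l ∧ X ≠ F := by
  induction l with
  | nil => simp at hc
  | cons s rest ih =>
    by_cases hs : PySem.Set.equal s target = true
    · have hsF : s = F := (hkey s (by simp)).mp hs
      subst hsF
      have hcc := hc
      rw [List.count_cons] at hcc
      simp at hcc
      have hnot : s ∉ rest := by
        first
        | exact hcc
        | exact List.count_eq_zero.mp hcc
      simp only [removeFirstEq, hs, if_true]
      constructor
      · intro hx
        exact ⟨List.mem_cons_of_mem _ hx, fun h => hnot (h ▸ hx)⟩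
      · rintro ⟨hx, hne⟩
        rcases List.mem_cons.mp hx with rfl | hx
        · exact absurd rfl hne
        · exact hx
    · have hsF : s ≠ F := fun h => hs ((hkey s (by simp)).mpr h)
      have hc' : rest.count F = 1 := by
        rw [List.count_cons] at hc
        simpa [hsF] using hc
      have ihr := ih (fun L hL => hkey L (List.mem_cons_of_mem _ hL)) hc'
      have hsf : PySem.Set.equal s target = false := by rwa [Bool.not_eq_true] at hs
      rw [show removeFirstEq target (s :: rest) = s :: removeFirstEq target rest from by
        simp [removeFirstEq, hsf]]
      simp only [List.mem_cons, ihr]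
      constructor
      · rintro (rfl | ⟨hx, hne⟩)
        · exact ⟨Or.inl rfl, hsF⟩
        · exact ⟨Or.inr hx, hne⟩
      · rintro ⟨rfl | hx, hne⟩
        · exact Or.inl rfl
        · exact Or.inr ⟨hx, hne⟩

-- generate_sets(sub, sup) = { sub ++ u | u proper sublist of sup − sub }  (up to the port's order)
theorem generateSets_mem (sub sup : List String) (hnd : sup.Nodup)
    (hsub : ∀ a ∈ sub, a ∈ sup) (L : List String) :
    L ∈ generateSets sub sup ↔
      ∃ u, u.Sublist (PySem.Set.diff sup sub) ∧ u ≠ PySem.Set.diff sup sub ∧ L = sub ++ u := by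
  set extra := PySem.Set.diff sup sub with hextra
  have hend : extra.Nodup := PySem.Set.nodup_diff _ _ hnd
  have hmemx : ∀ a, a ∈ extra ↔ a ∈ sup ∧ a ∉ sub := fun a => PySem.Set.mem_diff sup sub a
  have hdisj : ∀ a ∈ extra, a ∉ sub := fun a ha => ((hmemx a).mp ha).2
  have hxsup : ∀ a ∈ extra, a ∈ sup := fun a ha => ((hmemx a).mp ha).1
  have hcover : ∀ a ∈ sup, a ∈ sub ∨ a ∈ extra := by
    intro a ha
    by_cases h : a ∈ sub
    · exact Or.inl h
    · exact Or.inr ((hmemx a).mpr ⟨ha, h⟩)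
  -- an element of sets is set-equal to sup exactly when it is the literal full list
  have hkey : ∀ M ∈ sub :: genSetsRec sub extra,
      (PySem.Set.equal M sup = true ↔ M = sub ++ extra) := by
    intro M hM
    rcases List.mem_cons.mp hM with rfl | hM
    · constructor
      · intro h
        rw [PySem.Set.equal_iff] at h
        have hx0 : extra = [] := by
          rw [List.eq_nil_iff_forall_not_mem]
          intro a ha
          exact ((hmemx a).mp ha).2 ((h a).mpr (((hmemx a).mp ha).1))
        simp [hx0]
      · intro h
        have hx0 : extra = [] := by
          have := congrArg List.length h
          simp at this
          first
          | exact this.symm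
          | exact this
        rw [PySem.Set.equal_iff]
        intro x
        constructor
        · exact hsub x
        · intro hx
          rcases hcover x hx with h1 | h1
          · exact h1
          · rw [hx0] at h1; cases h1
    · obtain ⟨u, hu, hune, rfl⟩ := (genSetsRec_mem extra sub _ hend hdisj).mp hM
      constructor
      · intro h
        rw [PySem.Set.equal_iff] at h
        have : u = extra := by
          apply sublist_eq_of_superset hu hend
          intro x hx
          rcases List.mem_append.mp ((h x).mpr (hxsup x hx)) with h1 | h1
          · exact absurd h1 (hdisj x hx)
          · exact h1
        rw [this]
      · intro h
        have hux : u = extra := by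
          have := List.append_cancel_left h
          exact this
        rw [PySem.Set.equal_iff]
        intro x
        constructor
        · intro hx
          rcases List.mem_append.mp hx with h1 | h1
          · exact hsub x h1
          · exact hxsup x (hux ▸ h1)
        · intro hx
          rcases hcover x hx with h1 | h1
          · exact List.mem_append_left _ h1
          · exact List.mem_append_right _ (hux ▸ h1)
  have hcount : (sub :: genSetsRec sub extra).count (sub ++ extra) = 1 := by
    rcases eq_or_ne extra [] with hx0 | hx0
    · simp [hx0, genSetsRec]
    · rw [List.count_cons, genSetsRec_count extra sub hend hdisj hx0]
      have : sub ≠ sub ++ extra := by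
        intro h
        exact hx0 (List.append_right_eq_self.mp h.symm)
      simp [this]
  have hrm := removeFirstEq_mem sup (sub ++ extra) (sub :: genSetsRec sub extra) hkey hcount L
  show L ∈ removeFirstEq sup (sub :: genSetsRec sub extra) ↔ _
  rw [hrm]
  constructor
  · rintro ⟨hmem, hne⟩
    rcases List.mem_cons.mp hmem with rfl | hmem
    · refine ⟨[], List.nil_sublist _, ?_, by simp⟩
      intro h
      exact hne (by simp [← h])
    · obtain ⟨u, hu, -, rfl⟩ := (genSetsRec_mem extra sub _ hend hdisj).mp hmem
      exact ⟨u, hu, fun h => hne (by rw [h]), rfl⟩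
  · rintro ⟨u, hu, hune, rfl⟩
    refine ⟨?_, fun h => hune (List.append_cancel_left h)⟩
    rcases eq_or_ne u [] with rfl | hne0
    · simp
    · exact List.mem_cons_of_mem _ ((genSetsRec_mem extra sub _ hend hdisj).mpr ⟨u, hu, hne0, rfl⟩)

-- the M-subset enumeration check equals the single-scan blocker test
theorem mFailed_eq_blocked (SE : List (List String × List String)) (X Y : List String)
    (hY : Y.Nodup) (hXY : ∀ a ∈ X, a ∈ Y) :
    pvMFailed SE X Y = pvBlocked SE X Y := by
  rw [Bool.eq_iff_iff]
  simp only [pvMFailed, pvBlocked, pvInSE, List.any_eq_true, Bool.and_eq_true, Bool.not_eq_true']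
  have hmemx : ∀ a, a ∈ PySem.Set.diff Y X ↔ a ∈ Y ∧ a ∉ X := fun a => PySem.Set.mem_diff Y X a
  have hend : (PySem.Set.diff Y X).Nodup := PySem.Set.nodup_diff _ _ hY
  constructor
  · rintro ⟨M, hM, p, hp, e1, e2⟩
    obtain ⟨u, hu, hune, rfl⟩ := (generateSets_mem X Y hY hXY M).mp hM
    rw [PySem.Set.equal_iff] at e1
    refine ⟨p, hp, ⟨e2, ?_⟩, ?_, ?_⟩
    · rw [PySem.Set.issubset_iff]
      intro a ha
      exact (e1 a).mpr (List.mem_append_left _ ha)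
    · rw [PySem.Set.issubset_iff]
      intro a ha
      rcases List.mem_append.mp ((e1 a).mp ha) with h1 | h1
      · exact hXY a h1
      · exact ((hmemx a).mp (hu.mem h1)).1
    · rw [Bool.eq_false_iff]
      intro h
      rw [PySem.Set.equal_iff] at h
      apply hune
      apply sublist_eq_of_superset hu hend
      intro x hx
      rcases List.mem_append.mp ((e1 x).mp ((h x).mpr (((hmemx x).mp hx).1))) with h1 | h1
      · exact absurd h1 ((hmemx x).mp hx).2
      · exact h1
  · rintro ⟨p, hp, ⟨e2, hXp⟩, hpY, hne⟩
    have hXp' := (PySem.Set.issubset_iff _ _).mp hXp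
    have hpY' := (PySem.Set.issubset_iff _ _).mp hpY
    set u := List.filter (fun a => PySem.Set.contains p.1 a) (PySem.Set.diff Y X) with hudef
    have hu : u.Sublist (PySem.Set.diff Y X) := List.filter_sublist
    have humem : ∀ a, a ∈ u ↔ a ∈ PySem.Set.diff Y X ∧ a ∈ p.1 := by
      intro a
      rw [hudef, List.mem_filter, PySem.Set.contains_iff]
    have hune : u ≠ PySem.Set.diff Y X := by
      intro h
      rw [Bool.eq_false_iff] at hne
      apply hne
      rw [PySem.Set.equal_iff]
      intro x
      constructor
      · exact hpY' x
      · intro hx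
        by_cases hxX : x ∈ X
        · exact hXp' x hxX
        · have hxe : x ∈ PySem.Set.diff Y X := (hmemx x).mpr ⟨hx, hxX⟩
          exact ((humem x).mp (h ▸ hxe)).2
    refine ⟨X ++ u, (generateSets_mem X Y hY hXY _).mpr ⟨u, hu, hune, rfl⟩, p, hp, ?_, e2⟩
    rw [PySem.Set.equal_iff]
    intro x
    constructor
    · intro hx
      by_cases hxX : x ∈ X
      · exact List.mem_append_left _ hxX
      · exact List.mem_append_right _
          ((humem x).mpr ⟨(hmemx x).mpr ⟨hpY' x hx, hxX⟩, hx⟩)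
    · intro hx
      rcases List.mem_append.mp hx with h1 | h1
      · exact hXp' x h1
      · exact ((humem x).mp h1).2

-- A's inner model_prime scan equals B's scan of the precomputed candidate list
theorem valid_eq_candidates (SE : List (List String × List String)) (A : List String)
    (Yc Xp : List String) (hSE : ∀ p ∈ SE, p.2.Nodup) :
    pvValidYprime SE A Yc Xp =
      ((SE.filter (fun mp =>
          PySem.Set.equal mp.1 mp.2 && PySem.Set.equal (PySem.Set.diff mp.2 A) Yc)).map (·.2)).any
        (fun Yp => PySem.Set.issubset Xp Yp && !(pvBlocked SE Xp Yp)) := by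
  have hsym : ∀ s t : List String, PySem.Set.equal s t = PySem.Set.equal t s := by
    intro s t
    rw [Bool.eq_iff_iff, PySem.Set.equal_iff, PySem.Set.equal_iff]
    constructor <;> intro h x <;> exact (h x).symm
  have hif : ∀ c x : Bool, ((if c = true then false else x) = true) ↔ (c = false ∧ x = true) := by
    decide
  rw [Bool.eq_iff_iff]
  simp only [pvValidYprime, List.any_eq_true, List.mem_map, List.mem_filter,
    Bool.and_eq_true, Bool.not_eq_true']
  constructor
  · rintro ⟨mp, hmp, h⟩
    rw [hif] at h
    obtain ⟨hc, hx⟩ := h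
    simp only [Bool.or_eq_false_iff, Bool.not_eq_false'] at hc
    obtain ⟨⟨e1, e2⟩, e3⟩ := hc
    refine ⟨mp.2, ⟨mp, ⟨hmp, by rw [hsym]; exact e1, by rw [hsym]; exact e2⟩, rfl⟩, e3, ?_⟩
    rw [← mFailed_eq_blocked SE Xp mp.2 (hSE mp hmp) ((PySem.Set.issubset_iff _ _).mp e3)]
    rwa [Bool.not_eq_true'] at hx
  · rintro ⟨Yp, ⟨mp, ⟨hmp, e1, e2⟩, rfl⟩, e3, hb⟩
    refine ⟨mp, hmp, ?_⟩
    rw [hif]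
    refine ⟨?_, ?_⟩
    · simp only [Bool.or_eq_false_iff, Bool.not_eq_false']
      exact ⟨⟨by rw [hsym]; exact e1, by rw [hsym]; exact e2⟩, e3⟩
    · rw [Bool.not_eq_true',
        mFailed_eq_blocked SE Xp mp.2 (hSE mp hmp) ((PySem.Set.issubset_iff _ _).mp e3)]
      exact hb

-- iterative doubling enumerates exactly the sublists of a Nodup list
theorem pvPow_mem (Y : List String) (h : Y.Nodup) (L : List String) :
    L ∈ pvPow Y ↔ L.Sublist Y := by
  revert h L
  induction Y using List.reverseRecOn with
  | nil => intro h L; simp [pvPow]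
  | append_singleton l e ih =>
    intro h L
    have hnd : l.Nodup := (List.nodup_append.mp h).1
    have he : e ∉ l := fun hmem => (List.nodup_append.mp h).2.2 e hmem e (by simp) rfl
    have hstep : pvPow (l ++ [e]) = pvPow l ++ (pvPow l).map (fun s => PySem.Set.add s e) := by
      simp [pvPow, List.foldl_append]
    rw [hstep]
    simp only [List.mem_append, List.mem_map]
    constructor
    · rintro (hm | ⟨s, hs, rfl⟩)
      · exact ((ih hnd L).mp hm).trans (List.sublist_append_left l [e])
      · have hsl := (ih hnd s).mp hs
        have hes : e ∉ s := fun hmem => he (hsl.mem hmem)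
        rw [PySem.Set.add_of_not_mem hes]
        exact hsl.append (List.Sublist.refl [e])
    · intro hL
      rcases List.sublist_append_iff.mp hL with ⟨l1, l2, rfl, h1, h2⟩
      rcases List.sublist_singleton.mp h2 with rfl | rfl
      · exact Or.inl (by simpa using (ih hnd l1).mpr h1)
      · refine Or.inr ⟨l1, (ih hnd l1).mpr h1, ?_⟩
        rw [PySem.Set.add_of_not_mem (fun hmem => he (h1.mem hmem))]

-- the X-loop is an all over its list
theorem pvLoopX_eq_all (SE : List (List String × List String)) (A : List String)
    (Asubs : List (List String)) (Y : List String) (l : List (List String)) :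
    pvLoopX SE A Asubs Y l = l.all (fun X =>
      pvMFailed SE X Y ||
      (Asubs.map (fun sub => PySem.Set.union (PySem.Set.diff X A) sub)).all
        (fun Xp => pvValidYprime SE A (PySem.Set.diff Y A) Xp)) := by
  induction l with
  | nil => simp [pvLoopX]
  | cons X r ih =>
    rw [List.all_cons, ← ih]
    show (if pvMFailed SE X Y then pvLoopX SE A Asubs Y r
      else if (Asubs.map (fun sub => PySem.Set.union (PySem.Set.diff X A) sub)).all
          (fun Xp => pvValidYprime SE A (PySem.Set.diff Y A) Xp) then
        pvLoopX SE A Asubs Y r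
      else false) = _
    cases h1 : pvMFailed SE X Y <;>
      cases h2 : (Asubs.map (fun sub => PySem.Set.union (PySem.Set.diff X A) sub)).all
        (fun Xp => pvValidYprime SE A (PySem.Set.diff Y A) Xp) <;>
      simp [*]

-- ===== VERDICT (by name: the statement is the Claim_ definition above) =====
-- set-equality to a Nodup superlist forces list equality
theorem equal_eq_false_of_ne_sublist (X Y : List String) (hY : Y.Nodup)
    (hs : X.Sublist Y) (hne : X ≠ Y) : PySem.Set.equal X Y = false := by
  rw [Bool.eq_false_iff]
  intro h
  exact hne (sublist_eq_of_superset hs hY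
    (fun x hx => ((PySem.Set.equal_iff _ _).mp h x).mpr hx))

-- membership in A's outer iteration list: the proper sublists of Y
theorem generateSets_empty_mem (Y : List String) (hY : Y.Nodup) (X : List String) :
    X ∈ generateSets PySem.Set.empty Y ↔ X.Sublist Y ∧ X ≠ Y := by
  have hdiffY : PySem.Set.diff Y PySem.Set.empty = Y := by
    simp [PySem.Set.diff, PySem.Set.empty]
  rw [show (PySem.Set.empty : List String) = [] from rfl] at *
  rw [generateSets_mem [] Y hY (by simp) X, hdiffY]
  constructor
  · rintro ⟨u, hu, hune, rfl⟩
    exact ⟨by simpa using hu, by simpa using hune⟩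
  · rintro ⟨hs, hne⟩
    exact ⟨X, hs, hne, by simp⟩

-- ===== VERDICT (by name: the statement is the Claim_ definition above) =====
theorem cond_2_check_spec : Claim_equal_cond_2_check := by
  intro SE A Asubs model hdom hpre
  obtain ⟨hSE, hA, hAsubs, hm1, hm2⟩ := hpre
  show cond_2_check SE A Asubs model = cond_2_check_alt SE A Asubs model
  cases hy : PySem.Set.equal model.2 model.1 with
  | false => simp [cond_2_check, cond_2_check_alt, hy]
  | true =>
    simp only [cond_2_check, cond_2_check_alt, hy, Bool.not_true, Bool.false_eq_true, if_false]
    set Y := model.2 with hYdef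
    have hSE2 : ∀ p ∈ SE, p.2.Nodup := fun p hp => (hSE p hp).2
    have hpoint : ∀ X, X.Sublist Y → X ≠ Y →
        (pvMFailed SE X Y ||
          (Asubs.map (fun sub => PySem.Set.union (PySem.Set.diff X A) sub)).all
            (fun Xp => pvValidYprime SE A (PySem.Set.diff Y A) Xp)) =
        (PySem.Set.equal X Y || pvBlocked SE X Y ||
          Asubs.all (fun sub =>
            ((SE.filter (fun mp => PySem.Set.equal mp.1 mp.2 &&
                PySem.Set.equal (PySem.Set.diff mp.2 A) (PySem.Set.diff Y A))).map (·.2)).any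
              (fun Yp => PySem.Set.issubset (PySem.Set.union (PySem.Set.diff X A) sub) Yp &&
                !(pvBlocked SE (PySem.Set.union (PySem.Set.diff X A) sub) Yp)))) := by
      intro X hs hne
      have hXY : ∀ a ∈ X, a ∈ Y := fun a ha => hs.mem ha
      rw [mFailed_eq_blocked SE X Y hm2 hXY,
        equal_eq_false_of_ne_sublist X Y hm2 hs hne, Bool.false_or]
      congr 1
      rw [List.all_map, Bool.eq_iff_iff, List.all_eq_true, List.all_eq_true]
      constructor
      · intro h sub hsub
        rw [← valid_eq_candidates SE A (PySem.Set.diff Y A)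
          (PySem.Set.union (PySem.Set.diff X A) sub) hSE2]
        exact h sub hsub
      · intro h sub hsub
        show pvValidYprime SE A (PySem.Set.diff Y A) (PySem.Set.union (PySem.Set.diff X A) sub) = true
        rw [valid_eq_candidates SE A (PySem.Set.diff Y A)
          (PySem.Set.union (PySem.Set.diff X A) sub) hSE2]
        exact h sub hsub
    rw [pvLoopX_eq_all, Bool.eq_iff_iff, List.all_eq_true, List.all_eq_true]
    constructor
    · intro hall X hX
      have hs := (pvPow_mem Y hm2 X).mp hX
      by_cases hXeq : X = Y
      · have hYY : PySem.Set.equal X Y = true := by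
          rw [PySem.Set.equal_iff]; intro x; rw [hXeq]
        simp [hYY]
      · rw [← hpoint X hs hXeq]
        exact hall X ((generateSets_empty_mem Y hm2 X).mpr ⟨hs, hXeq⟩)
    · intro hall X hX
      obtain ⟨hs, hne⟩ := (generateSets_empty_mem Y hm2 X).mp hX
      rw [hpoint X hs hne]
      exact hall X ((pvPow_mem Y hm2 X).mpr hs)
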